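-- pv_equiv track=rewrite | github.com/peterse/perturbative_readout_correction | utils.py | kbits
-- ===== SOURCE A (Python) =====
-- def kbits(n, k):
--     """Generate integer form for all length-n bitstrings of weight k.
--
--     Output indices are ordered consistently but arbitrarily.
--
--     DISCLAIMER: ripped from StackOverflow, I don't take credit for this code.
--     Args:
--         n, k: integers
--     Returns:
--         Generator for indices that are ordered by their binary weight.
--     """
--     limit = 1 << n
--     val = (1 << k) - 1
--     while val < limit:
--         yield val
--         minbit = val & -val  #rightmost 1 bit
--         fillbit = (val + minbit) & ~val  #rightmost 0 to the left of that bit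
--         val = val + minbit | (fillbit // (minbit << 1)) - 1
-- ===== SOURCE B (Python) =====
-- def kbits(n, k):
--     """Generate integer form for all length-n bitstrings of weight k.
--
--     Recursive colex enumeration: a weight-k value below 2**n is its highest
--     set bit 2**top together with a weight-(k-1) value below 2**top; walking
--     top upward (and recursing) emits the values in increasing order.
--     """
--     if n < 0 or k < 0:
--         raise ValueError("negative shift count")
--     if k == 0:
--         yield 0
--         return
--     for top in range(k - 1, n):
--         high = 1 << top
--         for rest in kbits(top, k - 1):
--             yield high | rest
-- ===== Notes on version B (the rewrite author's own statement) =====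
-- stated objective: alternative
-- what changed: Replaced Gosper's bit-trick successor loop (val & -val, fill-bit, divide, or) by a recursive colex enumeration: each weight-k value below 2**n is emitted as its highest set bit 2**top plus a recursively enumerated weight-(k-1) value below 2**top, which yields the same strictly increasing sequence.
-- crash fix: For k == 0 (and n >= 0) A yields 0 and then raises ZeroDivisionError (minbit is 0), while B returns the single bitstring [0]; A also raises ValueError for negative n or k, where B raises ValueError too. — e.g. on kbits(3, 0): A raises ZeroDivisionError, B returns [0]
import Mathlib
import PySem

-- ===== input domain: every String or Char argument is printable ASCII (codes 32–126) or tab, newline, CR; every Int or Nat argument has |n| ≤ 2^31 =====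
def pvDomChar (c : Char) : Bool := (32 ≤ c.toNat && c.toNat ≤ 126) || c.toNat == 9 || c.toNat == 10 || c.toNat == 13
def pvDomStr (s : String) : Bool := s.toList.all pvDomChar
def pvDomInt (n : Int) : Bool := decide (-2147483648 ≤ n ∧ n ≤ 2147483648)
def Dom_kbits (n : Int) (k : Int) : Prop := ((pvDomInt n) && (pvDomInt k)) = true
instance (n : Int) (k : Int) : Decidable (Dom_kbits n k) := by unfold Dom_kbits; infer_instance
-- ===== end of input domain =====

-- B replaces Gosper's bit-trick successor loop by a recursive highest-bit (colex) enumeration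
-- of the same ascending sequence; alternative algorithm of similar cost, not claimed faster.

-- ===== PORT A =====
-- Gosper's hack step: the loop body's update of val (minbit/fillbit as in the Python source)
def gosperNext (val : Int) : Int :=
  let minbit := PySem.Int.band val (-val)
  let fillbit := PySem.Int.band (val + minbit) (Int.not val)
  PySem.Int.bor (val + minbit) (PySem.Int.floordiv fillbit (minbit <<< (1 : Nat)) - 1)

-- 'while val < limit: yield val; val = …'; fuel only totalizes (it never runs out under Pre_)
def gosperLoop (limit : Int) : Nat → Int → List Int
  | 0, _ => []
  | fuel+1, val => if val < limit then val :: gosperLoop limit fuel (gosperNext val) else []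

def kbits (n : Int) (k : Int) : List Int :=
  if n < 0 ∨ k < 0 then []  -- Python: '1 << negative' raises ValueError (excluded by Pre_)
  else
    let limit : Int := (1 : Int) <<< n.toNat
    gosperLoop limit (limit.toNat + 1) ((1 : Int) <<< k.toNat - 1)

-- ===== PORT B =====
def kbits_alt (n : Int) (k : Int) : List Int :=
  if n < 0 ∨ k < 0 then []  -- Python: raise ValueError (excluded by Pre_)
  else if k = 0 then [0]
  else (PySem.List.pyRange (k-1) n 1).flatMap (fun top =>
         (kbits_alt top (k-1)).map (fun rest => PySem.Int.bor ((1 : Int) <<< top.toNat) rest))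
termination_by k.toNat
decreasing_by omega

-- ===== PRECONDITION & SPEC =====
-- Pre_ excludes exactly the raising inputs: n < 0 or k < 0 (ValueError from '1 << n' / '1 << k')
-- and k = 0 (ZeroDivisionError from 'fillbit // (minbit << 1)' after the first yield).
def Pre_kbits (n : Int) (k : Int) : Prop := 0 ≤ n ∧ 1 ≤ k
instance (n : Int) (k : Int) : Decidable (Pre_kbits n k) := by unfold Pre_kbits; infer_instance

def pvWitness_kbits : Int × Int := (4, 2)

-- For k == 0 (and n ≥ 0) A yields 0 and then raises ZeroDivisionError, while B returns [0].
def Raises_kbits (n : Int) (k : Int) : Prop := 0 ≤ n ∧ k = 0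
instance (n : Int) (k : Int) : Decidable (Raises_kbits n k) := by unfold Raises_kbits; infer_instance
def pvRaiseWitness_kbits : Int × Int := (3, 0)
def pvRaiseWitnessOut_kbits : List Int := [0]

def Spec_kbits (n : Int) (k : Int) (out : List Int) : Prop := out = kbits_alt n k
instance (n : Int) (k : Int) (out : List Int) : Decidable (Spec_kbits n k out) := by unfold Spec_kbits; infer_instance

-- ===== CLAIM (what is proved, stated in full; the proofs are below) =====
def Claim_equal_kbits : Prop := ∀ (n : Int) (k : Int), Dom_kbits n k → Pre_kbits n k → Spec_kbits n k (kbits n k)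
def Claim_raises_kbits : Prop := (∀ (n : Int) (k : Int), Dom_kbits n k → Raises_kbits n k → ¬ Pre_kbits n k) ∧ (Dom_kbits (pvRaiseWitness_kbits.1) (pvRaiseWitness_kbits.2) ∧ Raises_kbits (pvRaiseWitness_kbits.1) (pvRaiseWitness_kbits.2) ∧ kbits_alt (pvRaiseWitness_kbits.1) (pvRaiseWitness_kbits.2) = pvRaiseWitnessOut_kbits)

-- ===== LEMMAS AND PROOFS =====

-- bit weight (popcount) of a natural number, via the prelude's bitCount
def wt (m : Nat) : Nat := PySem.Int.bitCount (m : Int)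

theorem wt_zero : wt 0 = 0 := by decide

theorem wt_one : wt 1 = 1 := by decide

theorem wt_two_mul_add (c : Nat) (b : Nat) (hb : b < 2) : wt (2 * c + b) = wt c + b := by
  rcases (by omega : b = 0 ∨ b = 1) with rfl | rfl
  · rcases Nat.eq_zero_or_pos c with rfl | hc
    · simp [wt_zero]
    · have h := PySem.Int.bitCount_natCast (m := 2*c+0) (by omega)
      unfold wt
      rw [h, show (2*c+0) % 2 = 0 by omega, show (2*c+0)/2 = c by omega]; omega
  · have h := PySem.Int.bitCount_natCast (m := 2*c+1) (by omega)
    unfold wt; rw [h]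
    have h1 : (2*c+1) % 2 = 1 := by omega
    have h2 : (2*c+1) / 2 = c := by omega
    rw [h1, h2]; omega

theorem wt_pow_mul_add (m : Nat) : ∀ c d : Nat, d < 2 ^ m → wt (2 ^ m * c + d) = wt c + wt d := by
  induction m with
  | zero => intro c d hd; interval_cases d; simp [wt_zero]
  | succ m ih =>
    intro c d hd
    have hd2 : d / 2 < 2 ^ m := by omega
    have e1 : 2 ^ (m+1) * c + d = 2 * (2 ^ m * c + d / 2) + d % 2 := by
      have : d = 2 * (d/2) + d % 2 := by omega
      ring_nf; omega
    rw [e1, wt_two_mul_add _ _ (by omega), ih c (d/2) hd2]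
    have : wt d = wt (d/2) + d % 2 := by
      conv_lhs => rw [show d = 2 * (d/2) + d % 2 by omega]
      rw [wt_two_mul_add _ _ (by omega)]
    omega

theorem wt_two_pow_sub_one (j : Nat) : wt (2 ^ j - 1) = j := by
  induction j with
  | zero => simp [wt_zero]
  | succ j ih =>
    have : 2 ^ (j+1) - 1 = 2 * (2 ^ j - 1) + 1 := by
      have := Nat.one_le_two_pow (n := j); omega
    rw [this, wt_two_mul_add _ _ (by omega), ih]

theorem wt_eq_zero_iff (m : Nat) : wt m = 0 ↔ m = 0 := by
  induction m using Nat.strong_induction_on with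
  | _ m ih =>
    rcases Nat.eq_zero_or_pos m with rfl | hm
    · simp [wt_zero]
    · constructor
      · intro h
        have e : m = 2 * (m/2) + m % 2 := by omega
        rw [e, wt_two_mul_add _ _ (by omega)] at h
        have h2 : wt (m/2) = 0 := by omega
        rcases Nat.eq_zero_or_pos (m/2) with h3 | h3
        · omega
        · have := (ih (m/2) (by omega)).mp h2; omega
      · omega

theorem two_pow_wt_sub_one_le (m : Nat) : 2 ^ wt m - 1 ≤ m := by
  induction m using Nat.strong_induction_on with
  | _ m ih =>
    rcases Nat.eq_zero_or_pos m with rfl | hm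
    · simp [wt_zero]
    · have e : m = 2 * (m/2) + m % 2 := by omega
      conv_lhs => rw [e, wt_two_mul_add _ _ (by omega)]
      have h := ih (m/2) (by omega)
      rcases (by omega : m % 2 = 0 ∨ m % 2 = 1) with h1 | h1 <;> rw [h1]
      · simp only [Nat.add_zero]; omega
      · rw [Nat.pow_succ]; omega

theorem wt_le_of_lt (j : Nat) : ∀ m : Nat, m < 2 ^ j → wt m ≤ j := by
  induction j with
  | zero => intro m hm; interval_cases m; simp [wt_zero]
  | succ j ih =>
    intro m hm
    rw [show m = 2 * (m/2) + m % 2 by omega, wt_two_mul_add _ _ (by omega)]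
    have := ih (m/2) (by omega)
    omega

theorem wt_max_below : ∀ e r a : Nat, e < 2 ^ (r + a) → wt e = a → e ≤ 2 ^ (r + a) - 2 ^ r := by
  intro e
  induction e using Nat.strong_induction_on with
  | _ e ih =>
    intro r a he hw
    rcases Nat.eq_zero_or_pos e with rfl | he0
    · have := Nat.one_le_two_pow (n := r)
      have := Nat.pow_le_pow_right (by omega : 1 ≤ 2) (show r ≤ r + a by omega); omega
    · have hsplit : e = 2 * (e/2) + e % 2 := by omega
      rcases (by omega : e % 2 = 0 ∨ e % 2 = 1) with h1 | h1
      · rcases Nat.eq_zero_or_pos r with rfl | hr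
        · rcases Nat.eq_zero_or_pos a with rfl | ha
          · have : wt e = 0 := hw; rw [wt_eq_zero_iff] at this; omega
          · have hw2 : wt (e/2) = a := by
              rw [hsplit, h1, wt_two_mul_add _ _ (by omega)] at hw; omega
            have hlt : e / 2 < 2 ^ (a - 1) := by
              have : (2:Nat) ^ a = 2 * 2 ^ (a-1) := by
                rw [← Nat.pow_succ']; congr 1; omega
              simp only [Nat.zero_add] at he; omega
            have := wt_le_of_lt (a-1) (e/2) hlt
            omega
        · have hw2 : wt (e/2) = a := by
            rw [hsplit, h1, wt_two_mul_add _ _ (by omega)] at hw; omega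
          have hlt : e / 2 < 2 ^ (r - 1 + a) := by
            have : (2:Nat) ^ (r + a) = 2 * 2 ^ (r - 1 + a) := by
              rw [← Nat.pow_succ']; congr 1; omega
            omega
          have hb := ih (e/2) (by omega) (r-1) a hlt hw2
          have e2 : (2:Nat) ^ (r + a) = 2 * 2 ^ (r - 1 + a) := by
            rw [← Nat.pow_succ']; congr 1; omega
          have e3 : (2:Nat) ^ r = 2 * 2 ^ (r - 1) := by
            rw [← Nat.pow_succ']; congr 1; omega
          have := Nat.one_le_two_pow (n := r - 1)
          have := Nat.pow_le_pow_right (by omega : 1 ≤ 2) (show r - 1 ≤ r - 1 + a by omega)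
          omega
      · rcases Nat.eq_zero_or_pos a with rfl | ha
        · have : wt e = 0 := hw; rw [wt_eq_zero_iff] at this; omega
        · have hw2 : wt (e/2) = a - 1 := by
            rw [hsplit, h1, wt_two_mul_add _ _ (by omega)] at hw; omega
          have e2 : (2:Nat) ^ (r + a) = 2 * 2 ^ (r + (a - 1)) := by
            rw [← Nat.pow_succ']; congr 1; omega
          have hlt : e / 2 < 2 ^ (r + (a-1)) := by omega
          have hb := ih (e/2) (by omega) r (a-1) hlt hw2
          have hdg : (2:Nat) ^ r ≤ 2 ^ (r + (a-1)) := Nat.pow_le_pow_right (by omega) (by omega)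
          have := Nat.one_le_two_pow (n := r)
          omega

-- testBit of m and m-1 agree above bit 0 when m is odd
theorem odd_and_pred_bit (m : Nat) (hm : m % 2 = 1) (j : Nat) :
    (m.testBit j && (m-1).testBit j) = (m-1).testBit j := by
  cases j with
  | zero =>
    rw [Nat.testBit_zero, Nat.testBit_zero, hm, show (m-1) % 2 = 0 by omega]
    simp
  | succ j =>
    rw [Nat.testBit_add_one, Nat.testBit_add_one, show m / 2 = (m-1)/2 by omega]
    exact Bool.and_self _

theorem and_pred (r m : Nat) (hm : m % 2 = 1) : (2^r * m) &&& (2^r * m - 1) = 2^r * (m - 1) := by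
  have hm1 : 1 ≤ m := by omega
  have h2r : 1 ≤ (2:Nat)^r := Nat.one_le_two_pow
  have e1 : 2^r * m - 1 = 2^r * (m-1) + (2^r - 1) := by
    have e0 : 2^r * m = 2^r * (m-1) + 2^r := by
      conv_lhs => rw [show m = (m-1)+1 by omega]
      ring
    omega
  apply Nat.eq_of_testBit_eq
  intro i
  rw [Nat.testBit_and, e1, Nat.testBit_two_pow_mul_add _ (by omega) i,
      Nat.testBit_two_pow_mul, Nat.testBit_two_pow_mul]
  by_cases hi : i < r
  · simp [hi, Nat.not_le.mpr hi]
  · simp only [if_neg hi, ge_iff_le, Nat.not_lt.mp hi, decide_true, Bool.true_and]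
    exact odd_and_pred_bit m hm (i - r)

theorem and_sum (r s u : Nat) (hu : u % 2 = 1) (hrs : r < s) :
    (2^s * u) &&& (2^s * u - 2^r) = 2^s * (u - 1) := by
  have h2r : 1 ≤ (2:Nat)^r := Nat.one_le_two_pow
  have h2s : 1 ≤ (2:Nat)^s := Nat.one_le_two_pow
  have hrs2 : (2:Nat)^r ≤ 2^s := Nat.pow_le_pow_right (by omega) (by omega)
  have e0 : 2^s * u = 2^s * (u-1) + 2^s := by
    conv_lhs => rw [show u = (u-1)+1 by omega]
    ring
  have e1 : 2^s * u - 2^r = 2^s * (u-1) + (2^s - 2^r) := by omega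
  apply Nat.eq_of_testBit_eq
  intro i
  rw [Nat.testBit_and, e1, Nat.testBit_two_pow_mul_add _ (by omega) i,
      Nat.testBit_two_pow_mul, Nat.testBit_two_pow_mul]
  by_cases hi : i < s
  · simp [hi, Nat.not_le.mpr hi]
  · simp only [if_neg hi, ge_iff_le, Nat.not_lt.mp hi, decide_true, Bool.true_and]
    exact odd_and_pred_bit u hu (i - s)

theorem not_cast (x : Nat) : Int.not (x : Int) = -(x : Int) - 1 := by
  cases x with
  | zero => rfl
  | succ n => show Int.not (Int.ofNat (n+1)) = _; rfl

theorem band_cast_neg (x : Nat) (hx : 1 ≤ x) :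
    PySem.Int.band (x : Int) (-(x : Int)) = ((x - (x &&& (x - 1)) : Nat) : Int) := by
  unfold PySem.Int.band
  rw [if_pos (by omega), if_neg (by omega)]
  rw [neg_neg, show ((x:Int) - 1) = ((x-1 : Nat) : Int) by omega, Int.toNat_natCast, Int.toNat_natCast]

theorem band_cast_not (w x : Nat) :
    PySem.Int.band (w : Int) (Int.not (x : Int)) = ((w - (w &&& x) : Nat) : Int) := by
  unfold PySem.Int.band
  rw [not_cast]
  rw [if_pos (by omega), if_neg (by omega)]
  rw [show (-(-(x:Int) - 1) - 1) = ((x : Nat) : Int) by omega, Int.toNat_natCast, Int.toNat_natCast]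

theorem gosperNext_eq (r a u : Nat) (hu : u % 2 = 1) (ha : 1 ≤ a) :
    gosperNext ((2^(r+a)*u - 2^r : Nat) : Int) = ((2^(r+a)*u + 2^(a-1) - 1 : Nat) : Int) := by
  have h2r : 1 ≤ (2:Nat)^r := Nat.one_le_two_pow
  have h2s : 1 ≤ (2:Nat)^(r+a) := Nat.one_le_two_pow
  have h2a1 : 1 ≤ (2:Nat)^(a-1) := Nat.one_le_two_pow
  have hu1 : 1 ≤ u := by omega
  have hrs2 : (2:Nat)^r < 2^(r+a) := Nat.pow_lt_pow_right (by omega) (by omega)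
  have hsu : (2:Nat)^(r+a) ≤ 2^(r+a) * u := Nat.le_mul_of_pos_right _ (by omega)
  have hmul : 0 < 2^(a-1) * u := Nat.mul_pos (by omega) (by omega)
  have he2 : (2:Nat)^a * u = 2 * (2^(a-1) * u) := by
    rw [← Nat.mul_assoc, ← Nat.pow_succ']; congr 2; omega
  set V : Nat := 2^(r+a)*u - 2^r with hV
  have hVfac : V = 2^r * (2^a * u - 1) := by
    rw [hV, Nat.mul_sub, ← Nat.mul_assoc, ← Nat.pow_add]
    omega
  have hodd : (2^a*u - 1) % 2 = 1 := by omega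
  have hVpos : 1 ≤ V := by omega
  have hsplit : 2^r * (2^a*u-1) = 2^r * (2^a*u-1-1) + 2^r := by
    conv_lhs => rw [show (2^a*u-1) = (2^a*u-1-1)+1 by omega]
    ring
  have hand : V &&& (V - 1) = 2^r * (2^a*u - 1 - 1) := by
    rw [hVfac]; exact and_pred r _ hodd
  have hmin : PySem.Int.band (V:Int) (-(V:Int)) = ((2^r : Nat) : Int) := by
    rw [band_cast_neg V hVpos, hand]
    congr 1
    omega
  have husplit : 2^(r+a) * u = 2^(r+a)*(u-1) + 2^(r+a) := by
    conv_lhs => rw [show u = (u-1)+1 by omega]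
    ring
  have hand2 : 2^(r+a)*u &&& V = 2^(r+a)*(u-1) := by
    rw [hV]; exact and_sum r (r+a) u hu (by omega)
  have hfill : PySem.Int.band ((2^(r+a)*u : Nat) : Int) (Int.not (V:Int)) = ((2^(r+a) : Nat) : Int) := by
    rw [band_cast_not, hand2]
    congr 1
    omega
  have hsum : ((V:Nat) : Int) + ((2^r : Nat) : Int) = ((2^(r+a)*u : Nat) : Int) := by
    rw [hV]; omega
  have hshift : ((2^r : Nat) : Int) <<< (1:Nat) = ((2^(r+1) : Nat) : Int) := by
    rw [Int.shiftLeft_eq]; push_cast [Nat.pow_succ]; ring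
  have hdiv : PySem.Int.floordiv ((2^(r+a) : Nat) : Int) ((2^(r+1) : Nat) : Int) = ((2^(a-1) : Nat) : Int) := by
    rw [PySem.Int.floordiv_natCast]
    congr 1
    rw [show r + a = (r+1) + (a-1) by omega, Nat.pow_add]
    exact Nat.mul_div_cancel_left _ (by omega)
  have hsub1 : ((2^(a-1) : Nat) : Int) - 1 = ((2^(a-1) - 1 : Nat) : Int) := by omega
  have haa : (2:Nat)^(a-1) ≤ 2^(r+a) := Nat.pow_le_pow_right (by omega) (by omega)
  have hor : (2:Nat)^(r+a)*u ||| (2^(a-1) - 1) = 2^(r+a)*u + (2^(a-1) - 1) :=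
    (Nat.two_pow_add_eq_or_of_lt (by omega) u).symm
  simp only [gosperNext]
  rw [hmin, hsum, hfill, hshift, hdiv, hsub1]
  rw [show PySem.Int.bor ((2^(r+a)*u : Nat) : Int) ((2^(a-1) - 1 : Nat) : Int)
        = ((2^(r+a)*u ||| (2^(a-1) - 1) : Nat) : Int) from PySem.Int.bor_natCast _ _]
  rw [hor]
  omega

theorem decomp (V : Nat) (h : 1 ≤ V) :
    ∃ r a u, u % 2 = 1 ∧ 1 ≤ a ∧ V = 2^(r+a)*u - 2^r ∧ 2^r ≤ 2^(r+a)*u := by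
  obtain ⟨r, m, hmOdd, hVm⟩ := Nat.exists_eq_two_pow_mul_odd (show V ≠ 0 by omega)
  have hm2 : m % 2 = 1 := Nat.odd_iff.mp hmOdd
  obtain ⟨a, u, huOdd, hm1⟩ := Nat.exists_eq_two_pow_mul_odd (show m+1 ≠ 0 by omega)
  have hu2 : u % 2 = 1 := Nat.odd_iff.mp huOdd
  have hm0 : 1 ≤ m := by omega
  have ha : 1 ≤ a := by
    by_contra hc
    have : a = 0 := by omega
    rw [this, Nat.pow_zero, Nat.one_mul] at hm1
    omega
  refine ⟨r, a, u, hu2, ha, ?_, ?_⟩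
  · rw [hVm, Nat.pow_add, Nat.mul_assoc, ← hm1, Nat.mul_add]
    omega
  · rw [Nat.pow_add, Nat.mul_assoc, ← hm1]
    have := Nat.mul_le_mul_left (2^r) (show 1 ≤ m + 1 by omega)
    omega

theorem wt_V (r a u : Nat) (hu : u % 2 = 1) (ha : 1 ≤ a) :
    wt (2^(r+a)*u - 2^r) = wt (u/2) + a := by
  have h2r : 1 ≤ (2:Nat)^r := Nat.one_le_two_pow
  have h2ra : 1 ≤ (2:Nat)^(r+a) := Nat.one_le_two_pow
  have hrs : (2:Nat)^r < 2^(r+a) := Nat.pow_lt_pow_right (by omega) (by omega)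
  have hq : (2:Nat)^(r+a+1) = 2 * 2^(r+a) := by rw [Nat.pow_succ]; ring
  have hsplit : 2^(r+a)*u - 2^r = 2^(r+a+1)*(u/2) + (2^(r+a) - 2^r) := by
    have : u = 2*(u/2) + 1 := by omega
    conv_lhs => rw [this]
    rw [Nat.mul_add, ← Nat.mul_assoc]
    rw [show 2^(r+a)*2 = 2^(r+a+1) by rw [Nat.pow_succ]]
    omega
  rw [hsplit, wt_pow_mul_add _ _ _ (by omega)]
  congr 1
  have : (2:Nat)^(r+a) - 2^r = 2^r * (2^a - 1) := by
    rw [Nat.mul_sub, Nat.mul_one, ← Nat.pow_add]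
  rw [this, ← Nat.add_zero (2^r * (2^a - 1)), wt_pow_mul_add _ _ _ (by omega),
      wt_two_pow_sub_one, wt_zero]
  omega

theorem wt_next (r a u : Nat) (hu : u % 2 = 1) (ha : 1 ≤ a) :
    wt (2^(r+a)*u + 2^(a-1) - 1) = wt (u/2) + a := by
  have h2a1 : 1 ≤ (2:Nat)^(a-1) := Nat.one_le_two_pow
  have haa : (2:Nat)^(a-1) ≤ 2^(r+a) := Nat.pow_le_pow_right (by omega) (by omega)
  have e1 : 2^(r+a)*u + 2^(a-1) - 1 = 2^(r+a)*u + (2^(a-1) - 1) := by omega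
  rw [e1, wt_pow_mul_add _ _ _ (by omega), wt_two_pow_sub_one]
  have : u = 2*(u/2) + 1 := by omega
  rw [show wt u = wt (u/2) + 1 by conv_lhs => rw [this]; rw [wt_two_mul_add _ _ (by omega)]]
  omega

theorem gosper_min (r a u w : Nat) (hu : u % 2 = 1) (ha : 1 ≤ a)
    (h1 : 2^(r+a)*u - 2^r < w) (h2 : w < 2^(r+a)*u + 2^(a-1) - 1) :
    wt w ≠ wt (2^(r+a)*u - 2^r) := by
  have h2r : 1 ≤ (2:Nat)^r := Nat.one_le_two_pow
  have h2ra : 1 ≤ (2:Nat)^(r+a) := Nat.one_le_two_pow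
  have h2a1 : 1 ≤ (2:Nat)^(a-1) := Nat.one_le_two_pow
  have hrs : (2:Nat)^r < 2^(r+a) := Nat.pow_lt_pow_right (by omega) (by omega)
  have haa : (2:Nat)^(a-1) ≤ 2^(r+a) := Nat.pow_le_pow_right (by omega) (by omega)
  have hq2 : (2:Nat)^(r+a+1) = 2 * 2^(r+a) := by rw [Nat.pow_succ]; ring
  have hu1 : 1 ≤ u := by omega
  obtain ⟨c, hu2⟩ : ∃ c, u = 2*c+1 := ⟨u/2, by omega⟩
  have key : 2^(r+a)*u = 2^(r+a+1)*c + 2^(r+a) := by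
    rw [hu2, Nat.pow_succ]; ring
  rw [wt_V r a u hu ha, show u/2 = c by omega]
  intro hww
  have hmod := Nat.div_add_mod w (2^(r+a+1))
  have helt : w % 2^(r+a+1) < 2^(r+a+1) := Nat.mod_lt _ (by omega)
  rcases Nat.lt_trichotomy (w / 2^(r+a+1)) c with hdc | hdc | hdc
  · have hmul : 2^(r+a+1)*(w/2^(r+a+1)) + 2^(r+a+1) ≤ 2^(r+a+1)*c := by
      have h := Nat.mul_le_mul_left (2^(r+a+1)) (show w/2^(r+a+1) + 1 ≤ c by omega)
      rw [Nat.mul_add, Nat.mul_one] at h; exact h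
    omega
  · have hwe : wt w = wt c + wt (w % 2^(r+a+1)) := by
      conv_lhs => rw [← hmod, hdc]
      exact wt_pow_mul_add _ _ _ helt
    have hwte : wt (w % 2^(r+a+1)) = a := by omega
    rw [hdc] at hmod
    by_cases hcase : w % 2^(r+a+1) < 2^(r+a)
    · have := wt_max_below (w % 2^(r+a+1)) r a hcase hwte
      omega
    · have hef : w % 2^(r+a+1) = 2^(r+a)*1 + (w % 2^(r+a+1) - 2^(r+a)) := by omega
      have hflt : w % 2^(r+a+1) - 2^(r+a) < 2^(r+a) := by omega
      have hwee : wt (w % 2^(r+a+1)) = wt 1 + wt (w % 2^(r+a+1) - 2^(r+a)) := by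
        conv_lhs => rw [hef]
        exact wt_pow_mul_add _ _ _ hflt
      rw [wt_one] at hwee
      have hlow := two_pow_wt_sub_one_le (w % 2^(r+a+1) - 2^(r+a))
      have hwtf : wt (w % 2^(r+a+1) - 2^(r+a)) = a - 1 := by omega
      rw [hwtf] at hlow
      omega
  · have hmul : 2^(r+a+1)*(c+1) ≤ 2^(r+a+1)*(w / 2^(r+a+1)) := Nat.mul_le_mul_left _ (by omega)
    rw [Nat.mul_add, Nat.mul_one] at hmul
    omega

-- the filtered range is empty once the lower bound reaches the limit
theorem filter_range_empty (K V limitN : Nat) (h : limitN ≤ V) :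
    (List.range limitN).filter (fun x => decide (wt x = K ∧ V ≤ x)) = [] := by
  apply List.filter_eq_nil_iff.mpr
  intro x hx
  have := List.mem_range.mp hx
  simp only [decide_eq_true_eq]
  omega

theorem gosper_loop_eq (K : Nat) : ∀ (fuel : Nat) (V : Nat), 1 ≤ V → wt V = K →
    ∀ limitN : Nat, limitN ≤ V + fuel →
    gosperLoop (limitN : Int) fuel (V : Int) =
      List.map (fun x : Nat => (x : Int)) ((List.range limitN).filter (fun x => decide (wt x = K ∧ V ≤ x))) := by
  intro fuel
  induction fuel with
  | zero =>
    intro V hV hwt limitN hfuel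
    rw [filter_range_empty K V limitN (by omega)]
    rfl
  | succ fuel ih =>
    intro V hV hwt limitN hfuel
    by_cases hlt : V < limitN
    · rw [show gosperLoop (limitN : Int) (fuel+1) (V : Int)
            = if (V:Int) < (limitN:Int) then (V:Int) :: gosperLoop (limitN:Int) fuel (gosperNext (V:Int)) else [] from rfl,
          if_pos (by exact_mod_cast hlt)]
      obtain ⟨r, a, u, hu, ha, hVeq, hle⟩ := decomp V hV
      have h2r : 1 ≤ (2:Nat)^r := Nat.one_le_two_pow
      have h2a1 : 1 ≤ (2:Nat)^(a-1) := Nat.one_le_two_pow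
      have hnext : gosperNext (V : Int) = ((2^(r+a)*u + 2^(a-1) - 1 : Nat) : Int) := by
        rw [hVeq]; exact gosperNext_eq r a u hu ha
      have hVV' : V < 2^(r+a)*u + 2^(a-1) - 1 := by omega
      have hwt' : wt (2^(r+a)*u + 2^(a-1) - 1) = K := by
        rw [wt_next r a u hu ha, ← wt_V r a u hu ha, ← hVeq, hwt]
      have hmin : ∀ x, V < x → x < 2^(r+a)*u + 2^(a-1) - 1 → wt x ≠ K := by
        intro x hx1 hx2
        rw [← hwt, hVeq]
        exact gosper_min r a u x hu ha (by omega) (by omega)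
      rw [hnext, ih _ (by omega) hwt' limitN (by omega)]
      -- list identity: prepend V, bump the lower bound to the successor
      have hrange : List.range limitN
          = (List.range V ++ [V]) ++ (List.range (limitN - (V+1))).map (fun j => (V+1)+j) := by
        rw [← List.range_succ, ← List.range_add]; congr 1; omega
      rw [hrange]
      rw [List.filter_append, List.filter_append, List.filter_append, List.filter_append]
      have hlow : ∀ (P : Nat → Prop) [DecidablePred P], (∀ x, P x → V ≤ x) →
          (List.range V).filter (fun x => decide (P x)) = [] := by
        intro P _ hP
        apply List.filter_eq_nil_iff.mpr
        intro x hx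
        have := List.mem_range.mp hx
        simp only [decide_eq_true_eq]
        intro hPx
        exact absurd (hP x hPx) (by omega)
      rw [hlow (fun x => wt x = K ∧ V ≤ x) (fun x h => h.2),
          hlow (fun x => wt x = K ∧ 2^(r+a)*u + 2^(a-1) - 1 ≤ x) (fun x h => by omega)]
      have hsing1 : [V].filter (fun x => decide (wt x = K ∧ V ≤ x)) = [V] := by
        simp [hwt]
      have hsing2 : [V].filter (fun x => decide (wt x = K ∧ 2^(r+a)*u + 2^(a-1) - 1 ≤ x)) = [] := by
        simp; omega
      rw [hsing1, hsing2]
      have htail : (List.filter (fun x => decide (wt x = K ∧ V ≤ x))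
            ((List.range (limitN - (V+1))).map (fun j => (V+1)+j)))
          = (List.filter (fun x => decide (wt x = K ∧ 2^(r+a)*u + 2^(a-1) - 1 ≤ x))
            ((List.range (limitN - (V+1))).map (fun j => (V+1)+j))) := by
        apply List.filter_congr
        intro x hx
        obtain ⟨j, _, rfl⟩ := List.mem_map.mp hx
        simp only [decide_eq_decide]
        constructor
        · intro hh
          refine ⟨hh.1, ?_⟩
          by_contra hcon
          exact hmin _ (by omega) (by omega) hh.1
        · intro hh
          exact ⟨hh.1, by omega⟩
      rw [htail]
      simp
    · rw [show gosperLoop (limitN : Int) (fuel+1) (V : Int)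
            = if (V:Int) < (limitN:Int) then (V:Int) :: gosperLoop (limitN:Int) fuel (gosperNext (V:Int)) else [] from rfl,
          if_neg (by exact_mod_cast hlt)]
      rw [filter_range_empty K V limitN (by omega)]
      rfl

theorem kbits_eq (n k : Int) (hn : 0 ≤ n) (hk : 1 ≤ k) :
    kbits n k = List.map (fun x : Nat => (x : Int)) ((List.range (2^n.toNat)).filter (fun x => decide (wt x = k.toNat))) := by
  have hK : 1 ≤ k.toNat := by omega
  have h2K : 1 ≤ (2:Nat)^k.toNat := Nat.one_le_two_pow
  have h2K2 : 2 ≤ (2:Nat)^k.toNat := by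
    calc (2:Nat) = 2^1 := rfl
    _ ≤ 2^k.toNat := Nat.pow_le_pow_right (by omega) hK
  have hsh : ∀ m : Nat, (1:Int) <<< m = ((2^m : Nat) : Int) := by
    intro m; rw [Int.shiftLeft_eq]; push_cast; ring
  simp only [kbits]
  rw [if_neg (by omega), hsh, hsh]
  rw [show ((2^k.toNat : Nat) : Int) - 1 = ((2^k.toNat - 1 : Nat) : Int) by omega,
      Int.toNat_natCast]
  rw [gosper_loop_eq k.toNat (2^n.toNat + 1) (2^k.toNat - 1) (by omega)
        (wt_two_pow_sub_one k.toNat) (2^n.toNat) (by omega)]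
  refine congrArg _ (List.filter_congr ?_)
  intro x _
  simp only [decide_eq_decide]
  constructor
  · exact fun h => h.1
  · intro h
    refine ⟨h, ?_⟩
    have := two_pow_wt_sub_one_le x
    rw [h] at this
    omega

theorem filter_wt_zero (m : Nat) (hm : 1 ≤ m) :
    (List.range m).filter (fun x => decide (wt x = 0)) = [0] := by
  induction m, hm using Nat.le_induction with
  | base => decide
  | succ m hm ih =>
    rw [List.range_succ, List.filter_append, ih]

    have : wt m ≠ 0 := by rw [Ne, wt_eq_zero_iff]; omega
    simp [this]

theorem colex (K : Nat) : ∀ M : Nat,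
    ((List.range (M - K)).map (fun j => K + j)).flatMap
        (fun t => ((List.range (2^t)).filter (fun x => decide (wt x = K))).map (fun x => 2^t + x))
      = (List.range (2^M)).filter (fun x => decide (wt x = K+1)) := by
  intro M
  induction M with
  | zero =>
    simp only [Nat.zero_sub, List.range_zero, List.map_nil, List.flatMap_nil, Nat.pow_zero]
    rw [show List.range 1 = [0] from rfl]
    have : wt 0 ≠ K + 1 := by rw [wt_zero]; omega
    simp [this]
  | succ M ih =>
    by_cases hMK : M < K
    · rw [show M + 1 - K = 0 by omega]
      simp only [List.range_zero, List.map_nil, List.flatMap_nil]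
      symm
      apply List.filter_eq_nil_iff.mpr
      intro x hx
      have hxlt := List.mem_range.mp hx
      have : wt x ≤ M + 1 := wt_le_of_lt _ _ (by omega)
      simp only [decide_eq_true_eq]
      omega
    · have hsplit : M + 1 - K = (M - K) + 1 := by omega
      rw [hsplit, List.range_succ, List.map_append, List.flatMap_append, ih]
      rw [show List.map (fun j => K + j) [M - K] = [M] by
            rw [List.map_singleton]; congr 1; omega]
      have hpow : (2:Nat)^(M+1) = 2^M + 2^M := by rw [Nat.pow_succ]; ring
      rw [hpow, List.range_add, List.filter_append]
      congr 1
      rw [List.flatMap_cons, List.flatMap_nil, List.append_nil, List.filter_map]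
      refine congrArg _ (List.filter_congr ?_)
      intro x hx
      have hxlt := List.mem_range.mp hx
      have hwx : wt (2^M + x) = 1 + wt x := by
        rw [show 2^M + x = 2^M * 1 + x by ring, wt_pow_mul_add _ _ _ hxlt, wt_one]
      show decide (wt x = K) = ((fun x => decide (wt x = K+1)) ∘ (fun x => 2^M + x)) x
      simp only [Function.comp_apply, decide_eq_decide]
      omega

theorem kbits_alt_eq (K : Nat) : ∀ (n : Int), 0 ≤ n →
    kbits_alt n (K : Int) = List.map (fun x : Nat => (x : Int)) ((List.range (2^n.toNat)).filter (fun x => decide (wt x = K))) := by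
  induction K with
  | zero =>
    intro n hn
    rw [kbits_alt, if_neg (by omega), if_pos (by norm_num)]
    rw [filter_wt_zero _ Nat.one_le_two_pow]
    simp
  | succ K ih =>
    intro n hn
    rw [kbits_alt, if_neg (by omega), if_neg (by omega)]
    rw [show ((K+1 : Nat) : Int) - 1 = (K : Int) by push_cast; ring]
    rw [PySem.List.pyRange_one]
    rw [show ((n : Int) - (K:Int)).toNat = n.toNat - K by omega]
    rw [List.flatMap_map]
    have hstep : ∀ j ∈ List.range (n.toNat - K),
        (kbits_alt ((K:Int) + (j:Int)) (K:Int)).map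
            (fun rest => PySem.Int.bor ((1:Int) <<< ((K:Int) + (j:Int)).toNat) rest)
        = List.map (fun x : Nat => (x:Int))
            (((List.range (2^(K+j))).filter (fun x => decide (wt x = K))).map (fun x => 2^(K+j) + x)) := by
      intro j _
      rw [ih ((K:Int)+(j:Int)) (by omega)]
      rw [show ((K:Int)+(j:Int)).toNat = K + j by omega]
      rw [List.map_map, List.map_map]
      apply List.map_congr_left
      intro x hx
      have hxlt : x < 2^(K+j) := List.mem_range.mp (List.mem_of_mem_filter hx)
      simp only [Function.comp_apply]
      rw [show (1:Int) <<< (K+j) = ((2^(K+j) : Nat) : Int) by rw [Int.shiftLeft_eq]; push_cast; ring]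
      rw [PySem.Int.bor_natCast]
      congr 1
      conv_lhs => rw [show (2:Nat)^(K+j) = 2^(K+j)*1 by ring]
      conv_rhs => rw [show (2:Nat)^(K+j) = 2^(K+j)*1 by ring]
      exact (Nat.two_pow_add_eq_or_of_lt hxlt 1).symm
    rw [List.flatMap_congr hstep]
    have hcolex := colex K n.toNat
    rw [List.flatMap_map] at hcolex
    rw [show (List.range (n.toNat - K)).flatMap
          (fun j => List.map (fun x : Nat => (x:Int))
            (((List.range (2^(K+j))).filter (fun x => decide (wt x = K))).map (fun x => 2^(K+j) + x)))
        = List.map (fun x : Nat => (x:Int))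
            ((List.range (n.toNat - K)).flatMap
              (fun j => ((List.range (2^(K+j))).filter (fun x => decide (wt x = K))).map (fun x => 2^(K+j) + x)))
        from (List.map_flatMap).symm]
    rw [hcolex]

-- ===== VERDICT (by name: the statement is the Claim_ definition above) =====
theorem kbits_spec : Claim_equal_kbits := by
  intro n k _ hpre
  obtain ⟨hn, hk⟩ := hpre
  unfold Spec_kbits
  have hkK : k = ((k.toNat : Nat) : Int) := by omega
  rw [kbits_eq n k hn hk]
  conv_rhs => rw [hkK]
  rw [kbits_alt_eq k.toNat n hn]

theorem kbits_raises : Claim_raises_kbits := by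
  unfold Claim_raises_kbits
  refine ⟨by intro n k _ hr; unfold Raises_kbits Pre_kbits at *; omega, by decide, by decide, ?_⟩
  show kbits_alt 3 0 = [0]
  rw [kbits_alt]
  norm_num

-- standalone re-check of the crash-fix witness value (B's output where A raises), projected from kbits_raises
theorem kbits_raises_witness :
    kbits_alt pvRaiseWitness_kbits.1 pvRaiseWitness_kbits.2 = pvRaiseWitnessOut_kbits :=
  kbits_raises.2.2.2
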